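-- pv_equiv track=rewrite | github.com/ivaylo-nikolov5/Python-Course | Courses/Basics/Lecture 19/character_multiplier.py | sum_func
-- ===== SOURCE A (Python) =====
-- def sum_func(word1, word2):
--     total = 0
--     for x in range(len(word1)):
--         if x < len(word2):
--             total += ord(word1[x]) * ord(word2[x])
--         else:
--             total += ord(word1[x])
--
--     return total
-- ===== SOURCE B (Python) =====
-- def sum_func(word1, word2):
--     # By the identity ord(a)*ord(b) = ord(a) + ord(a)*(ord(b)-1):
--     # start from the plain sum of all character codes of word1, then apply
--     # the multiplicative correction on the aligned prefix.
--     total = sum(map(ord, word1))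
--     for a, b in zip(word1, word2):
--         total += ord(a) * (ord(b) - 1)
--     return total
-- ===== Notes on version B (the rewrite author's own statement) =====
-- stated objective: alternative
-- what changed: Uses the identity ord(a)*ord(b) = ord(a) + ord(a)*(ord(b)-1): B sums all codes of word1 unconditionally, then adds a multiplicative correction over the zipped prefix, removing A's per-index length branch entirely.
import Mathlib
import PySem

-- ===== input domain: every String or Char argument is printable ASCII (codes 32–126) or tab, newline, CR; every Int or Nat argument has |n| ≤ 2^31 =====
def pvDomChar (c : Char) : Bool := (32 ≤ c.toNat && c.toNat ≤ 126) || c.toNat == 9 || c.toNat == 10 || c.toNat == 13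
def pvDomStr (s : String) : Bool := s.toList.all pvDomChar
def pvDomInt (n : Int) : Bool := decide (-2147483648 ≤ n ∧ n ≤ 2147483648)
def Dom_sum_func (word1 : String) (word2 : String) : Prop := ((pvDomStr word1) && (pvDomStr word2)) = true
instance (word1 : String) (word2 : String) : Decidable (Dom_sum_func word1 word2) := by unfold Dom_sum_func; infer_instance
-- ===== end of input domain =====

-- B drops A's per-index length branch via the identity ord(a)*ord(b) = ord(a) + ord(a)*(ord(b)-1):
-- it sums ALL codes of word1, then adds the multiplicative correction over the zipped prefix; objective: alternative.

-- ===== PORT A =====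
-- indexed loop 'for x in range(len(word1))'; word1[x]/word2[x] are ported with pyGetD,
-- exact here because every index read is in range (x < len word1, and x < len word2 in the branch).
def sum_func (word1 : String) (word2 : String) : Int :=
  (PySem.List.pyRange 0 (word1.toList.length : Int) 1).foldl
    (fun total x =>
      if x < (word2.toList.length : Int) then
        total + ((PySem.List.pyGetD word1.toList x ' ').toNat : Int)
              * ((PySem.List.pyGetD word2.toList x ' ').toNat : Int)
      else
        total + ((PySem.List.pyGetD word1.toList x ' ').toNat : Int)) 0

-- ===== PORT B =====
-- total = sum(map(ord, word1)); then the for-loop over zip(word1, word2) as a foldl.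
def sum_func_alt (word1 : String) (word2 : String) : Int :=
  let total : Int := (word1.toList.map (fun c => (c.toNat : Int))).sum
  (word1.toList.zip word2.toList).foldl
    (fun total p => total + (p.1.toNat : Int) * ((p.2.toNat : Int) - 1)) total

-- ===== PRECONDITION & SPEC =====
def Spec_sum_func (word1 : String) (word2 : String) (out : Int) : Prop := out = sum_func_alt word1 word2
instance (word1 : String) (word2 : String) (out : Int) : Decidable (Spec_sum_func word1 word2 out) := by unfold Spec_sum_func; infer_instance

-- ===== CLAIM (what is proved, stated in full; the proofs are below) =====
def Claim_equal_sum_func : Prop := ∀ (word1 : String) (word2 : String), Dom_sum_func word1 word2 → Spec_sum_func word1 word2 (sum_func word1 word2)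

-- ===== LEMMAS AND PROOFS =====

-- A's loop body at (Nat) index k, after casting through pyGetD_natCast
def pvBody (cs1 cs2 : List Char) (k : Nat) : Int :=
  if k < cs2.length then ((cs1.getD k ' ').toNat : Int) * ((cs2.getD k ' ').toNat : Int)
  else ((cs1.getD k ' ').toNat : Int)

lemma pvBody_succ (c : Char) (cs1 cs2 : List Char) (k : Nat) :
    pvBody (c :: cs1) cs2 (k + 1) = pvBody cs1 cs2.tail k := by
  cases cs2 with
  | nil => simp [pvBody]
  | cons d ds => simp [pvBody]

-- A's total is the zip-product sum plus the tail sum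
lemma pvKey (cs1 cs2 : List Char) :
    ((List.range cs1.length).map (pvBody cs1 cs2)).sum
      = ((cs1.zip cs2).map (fun p => ((p.1.toNat : Int) * (p.2.toNat : Int)))).sum
        + ((cs1.drop cs2.length).map (fun c => (c.toNat : Int))).sum := by
  induction cs1 generalizing cs2 with
  | nil => simp
  | cons c t ih =>
    rw [List.length_cons, List.range_succ_eq_map, List.map_cons, List.map_map, List.sum_cons]
    have hmap : ((List.range t.length).map (pvBody (c :: t) cs2 ∘ Nat.succ)).sum
        = ((List.range t.length).map (pvBody t cs2.tail)).sum := by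
      apply congrArg
      apply List.map_congr_left
      intro k _
      exact pvBody_succ c t cs2 k
    rw [hmap, ih cs2.tail]
    cases cs2 with
    | nil => simp [pvBody]
    | cons d ds => simp [pvBody]; ring

-- the full sum over cs1 splits into the zipped-prefix part and the dropped tail
lemma pvSplit (cs1 cs2 : List Char) :
    (cs1.map (fun c => (c.toNat : Int))).sum
      = ((cs1.zip cs2).map (fun p => ((p.1.toNat : Int)))).sum
        + ((cs1.drop cs2.length).map (fun c => (c.toNat : Int))).sum := by
  induction cs1 generalizing cs2 with
  | nil => simp
  | cons c t ih =>
    cases cs2 with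
    | nil => simp
    | cons d ds =>
      simp only [List.zip_cons_cons, List.map_cons, List.sum_cons, List.length_cons,
        List.drop_succ_cons]
      rw [ih ds]; ring

-- combine the two B-side zip sums into A's zip-product sum
lemma pvComb (l : List (Char × Char)) :
    (l.map (fun p => ((p.1.toNat : Int) * (p.2.toNat : Int)))).sum
      = (l.map (fun p => ((p.1.toNat : Int)))).sum
        + (l.map (fun p => (p.1.toNat : Int) * ((p.2.toNat : Int) - 1))).sum := by
  induction l with
  | nil => simp
  | cons p t ih => simp only [List.map_cons, List.sum_cons]; rw [ih]; ring

theorem sum_func_spec : Claim_equal_sum_func := by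
  intro word1 word2 _
  unfold Spec_sum_func sum_func sum_func_alt
  rw [PySem.List.pyRange_one, List.foldl_map]
  simp only [zero_add, Int.sub_zero, Int.toNat_natCast]
  rw [PySem.List.foldl_congr_mem (List.range word1.toList.length) _
        (fun total k => total + pvBody word1.toList word2.toList k) 0
        (by
          intro acc k _
          simp only [PySem.List.pyGetD_natCast, pvBody, Nat.cast_lt]
          split <;> rfl)]
  rw [PySem.List.foldl_add, pvKey word1.toList word2.toList]
  rw [PySem.List.foldl_add, pvSplit word1.toList word2.toList]
  rw [pvComb (word1.toList.zip word2.toList)]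
  ring
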